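-- pv_equiv track=rewrite | github.com/michelranari/MathDe | PROJET_PIFE_3.7/BMR/Enumeration.py | nombres_groupes_max
-- ===== SOURCE A (Python) =====
-- def nombres_groupes_max(n):
--  if (n <= 1):
--      return 0
--  elif (n % 2 == 0):
--      return (int) (n / 2)
--  else:
--      nb = nombres_groupes_max(n - 3)
--      nb = nb + 1
--      return nb
-- ===== SOURCE B (Python) =====
-- def nombres_groupes_max(n):
--     # Closed form: the recursion only peels one odd step; for n >= 2 the answer is floor(n/2).
--     return 0 if n <= 1 else n // 2
-- ===== Notes on version B (the rewrite author's own statement) =====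
-- stated objective: simpler
-- what changed: Replaced the recursive case analysis (odd n recursing once via n-3) by a single closed-form expression 0 if n<=1 else n//2.
import Mathlib
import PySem

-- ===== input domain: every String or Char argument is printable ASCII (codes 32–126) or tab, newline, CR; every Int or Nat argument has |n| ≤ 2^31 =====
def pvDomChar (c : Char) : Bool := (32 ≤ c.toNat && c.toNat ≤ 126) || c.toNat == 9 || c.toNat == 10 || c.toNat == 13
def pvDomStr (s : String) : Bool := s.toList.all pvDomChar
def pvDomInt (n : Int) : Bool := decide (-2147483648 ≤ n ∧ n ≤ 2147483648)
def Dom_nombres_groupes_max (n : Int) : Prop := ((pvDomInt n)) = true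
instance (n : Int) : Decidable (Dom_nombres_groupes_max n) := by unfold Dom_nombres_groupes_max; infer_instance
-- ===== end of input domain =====

-- B replaces A's recursive odd-case peeling by the single closed form `0 if n<=1 else n//2` (simpler).


-- ===== PORT A =====
-- `int(n / 2)` is Python float division then truncation; this branch is only reached for even
-- 2 ≤ n ≤ 2^31, where the float quotient is exact and truncation equals floor division,
-- so it is ported as PySem.Int.floordiv (exact on the stated domain).
def nombres_groupes_max (n : Int) : Int :=
  if n ≤ 1 then 0
  else if PySem.Int.mod n 2 == 0 then PySem.Int.floordiv n 2
  else nombres_groupes_max (n - 3) + 1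
termination_by n.toNat
decreasing_by simp at *; omega

-- ===== PORT B =====
def nombres_groupes_max_alt (n : Int) : Int :=
  if n ≤ 1 then 0 else PySem.Int.floordiv n 2

-- ===== PRECONDITION & SPEC =====
def Spec_nombres_groupes_max (n : Int) (out : Int) : Prop := out = nombres_groupes_max_alt n
instance (n : Int) (out : Int) : Decidable (Spec_nombres_groupes_max n out) := by unfold Spec_nombres_groupes_max; infer_instance

-- ===== CLAIM (what is proved, stated in full; the proofs are below) =====
def Claim_equal_nombres_groupes_max : Prop := ∀ (n : Int), Dom_nombres_groupes_max n → Spec_nombres_groupes_max n (nombres_groupes_max n)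

-- ===== LEMMAS AND PROOFS =====
theorem nombres_groupes_max_eq_alt : ∀ n : Int, nombres_groupes_max n = nombres_groupes_max_alt n := by
  intro n
  fun_induction nombres_groupes_max n with
  | case1 n h => simp [nombres_groupes_max_alt, h]
  | case2 n h h2 => simp [nombres_groupes_max_alt, h]
  | case3 n h h2 ih =>
    rw [ih]
    simp only [nombres_groupes_max_alt, PySem.Int.floordiv] at *
    simp only [PySem.Int.mod, beq_iff_eq, Int.fmod_eq_emod] at h2
    rw [Int.fdiv_eq_ediv, Int.fdiv_eq_ediv]
    split_ifs <;> omega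

-- ===== VERDICT (by name: the statement is the Claim_ definition above) =====
theorem nombres_groupes_max_spec : Claim_equal_nombres_groupes_max := by
  intro n _
  unfold Spec_nombres_groupes_max
  exact nombres_groupes_max_eq_alt n
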